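-- pv_equiv track=rewrite | github.com/southrussian/ShittyMLy | nums_in_a_row.py | count_removed_numbers
-- ===== SOURCE A (Python) =====
-- def count_removed_numbers(sequence):
--     result = 0
--     current_number = None
--     current_count = 0
--
--     for number in sequence:
--         if current_number is not None:
--             if current_number == number:
--                 current_count += 1
--             else:
--                 if current_count >= 3:
--                     result += current_count
--                 current_number = number
--                 current_count = 1
--         else:
--             current_number = number
--             current_count = 1
--
--     # Check for the last subsequence
--     if current_count >= 3:
--         result += current_count
--
--     return result
-- ===== SOURCE B (Python) =====
-- def count_removed_numbers(sequence):
--     n = len(sequence)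
--
--     def triple(j):
--         return 0 <= j and j + 2 < n and sequence[j] == sequence[j + 1] == sequence[j + 2]
--
--     return sum(1 for i in range(n) if triple(i) or triple(i - 1) or triple(i - 2))
-- ===== Notes on version B (the rewrite author's own statement) =====
-- stated objective: alternative
-- what changed: B never tracks runs or run lengths at all: for each index it tests locally whether one of the three length-3 windows containing it consists of three equal elements (an element belongs to a run of length >= 3 iff such a window exists), and counts the indices that pass; A's current_number/current_count state machine and trailing flush disappear.
import Mathlib
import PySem

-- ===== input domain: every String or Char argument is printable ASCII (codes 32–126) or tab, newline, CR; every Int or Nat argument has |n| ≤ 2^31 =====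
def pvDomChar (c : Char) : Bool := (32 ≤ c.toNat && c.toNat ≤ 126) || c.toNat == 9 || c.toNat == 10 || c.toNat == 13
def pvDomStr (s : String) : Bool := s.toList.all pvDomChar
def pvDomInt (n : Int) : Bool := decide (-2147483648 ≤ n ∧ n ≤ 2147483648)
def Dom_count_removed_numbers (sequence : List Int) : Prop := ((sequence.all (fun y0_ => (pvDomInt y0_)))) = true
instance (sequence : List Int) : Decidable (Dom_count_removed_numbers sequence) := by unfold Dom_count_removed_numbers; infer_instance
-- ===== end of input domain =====

-- B drops A's run state machine entirely: it counts the indices that sit inside some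
-- length-3 window of equal elements (a purely local per-index test; alternative, same cost).

-- ===== PORT A =====
-- A's loop: state (result, current_number : Option Int, current_count); the final 'if' flushes the last run.
def pvLoopA : List Int → Int → Option Int → Int → Int
  | [], result, _, cnt => if cnt ≥ 3 then result + cnt else result
  | n :: rest, result, cur, cnt =>
    match cur with
    | some c =>
      if c = n then pvLoopA rest result (some c) (cnt + 1)
      else pvLoopA rest (if cnt ≥ 3 then result + cnt else result) (some n) 1
    | none => pvLoopA rest result (some n) 1

def count_removed_numbers (sequence : List Int) : Int := pvLoopA sequence 0 none 0

-- ===== PORT B =====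
-- triple(j): 0 <= j and j+2 < n and sequence[j] == sequence[j+1] == sequence[j+2]
def pvTriple (s : List Int) (j : Int) : Bool :=
  decide (0 ≤ j) && decide (j + 2 < (s.length : Int)) &&
  (match PySem.List.pyGet? s j, PySem.List.pyGet? s (j + 1), PySem.List.pyGet? s (j + 2) with
   | some a, some b, some c => a == b && b == c
   | _, _, _ => false)

-- sum(1 for i in range(n) if triple(i) or triple(i-1) or triple(i-2))
def count_removed_numbers_alt (sequence : List Int) : Int :=
  ((PySem.List.pyRange 0 (sequence.length : Int) 1).countP
    (fun i => pvTriple sequence i || pvTriple sequence (i - 1) || pvTriple sequence (i - 2)) : Int)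

-- ===== PRECONDITION & SPEC =====
def Spec_count_removed_numbers (sequence : List Int) (out : Int) : Prop := out = count_removed_numbers_alt sequence
instance (sequence : List Int) (out : Int) : Decidable (Spec_count_removed_numbers sequence out) := by unfold Spec_count_removed_numbers; infer_instance

-- ===== CLAIM (what is proved, stated in full; the proofs are below) =====
def Claim_equal_count_removed_numbers : Prop := ∀ (sequence : List Int), Dom_count_removed_numbers sequence → Spec_count_removed_numbers sequence (count_removed_numbers sequence)

-- ===== LEMMAS AND PROOFS =====

-- The per-index condition B counts.
def pvOk (s : List Int) (i : Int) : Bool :=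
  pvTriple s i || pvTriple s (i - 1) || pvTriple s (i - 2)

theorem alt_eq_countP (s : List Int) :
    count_removed_numbers_alt s = ((List.range s.length).countP (fun (k : Nat) => pvOk s (k : Int)) : Int) := by
  unfold count_removed_numbers_alt pvOk
  rw [PySem.List.pyRange_one, List.countP_map]
  congr 1
  simp [Function.comp_def]

-- Element lookup in (replicate L x ++ d).
theorem get_run (L : Nat) (x : Int) (d : List Int) (j : Int) (h0 : 0 ≤ j) (hL : j < (L : Int)) :
    PySem.List.pyGet? (List.replicate L x ++ d) j = some x := by
  rw [PySem.List.pyGet?_of_nonneg _ h0]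
  have hj : j.toNat < L := by omega
  rw [List.getElem?_append_left (by simpa using hj), List.getElem?_replicate, if_pos hj]

theorem get_shift (L : Nat) (x : Int) (d : List Int) (j : Int) (h : (L : Int) ≤ j) :
    PySem.List.pyGet? (List.replicate L x ++ d) j = PySem.List.pyGet? d (j - L) := by
  have h0 : (0 : Int) ≤ j := by omega
  rw [PySem.List.pyGet?_of_nonneg _ h0, PySem.List.pyGet?_of_nonneg _ (by omega : (0:Int) ≤ j - L)]
  rw [List.getElem?_append_right (by simp; omega)]
  congr 1
  simp


theorem triple_in_run (L : Nat) (x : Int) (d : List Int) (j : Int)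
    (h0 : 0 ≤ j) (h3 : j + 3 ≤ (L : Int)) :
    pvTriple (List.replicate L x ++ d) j = true := by
  unfold pvTriple
  rw [get_run L x d j h0 (by omega), get_run L x d (j + 1) (by omega) (by omega),
    get_run L x d (j + 2) (by omega) (by omega)]
  simp
  omega

theorem head?_ne (d : List Int) (x y : Int) (hd : d.head? ≠ some x) (hy : d.head? = some y) :
    (x == y) = false := by
  rw [beq_eq_false_iff_ne]
  intro h
  exact hd (h ▸ hy)

theorem triple_span (L : Nat) (x : Int) (d : List Int) (j : Int)
    (hd : d.head? ≠ some x) (h1 : (L : Int) - 2 ≤ j) (h2 : j < (L : Int)) (h0 : 0 ≤ j) :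
    pvTriple (List.replicate L x ++ d) j = false := by
  have hgetL : PySem.List.pyGet? (List.replicate L x ++ d) (L : Int) = d.head? := by
    rw [get_shift L x d (L : Int) (by omega), show (L:Int) - L = 0 by ring, PySem.List.pyGet?_zero]
    cases d <;> simp
  have hj2 : j = (L : Int) - 2 ∨ j = (L : Int) - 1 := by omega
  unfold pvTriple
  by_cases hLen : j + 2 < (((List.replicate L x ++ d).length : Nat) : Int)
  · rcases hj2 with h | h
    · rw [get_run L x d j h0 (by omega), h, show (L:Int) - 2 + 1 = L - 1 by ring,
        show (L:Int) - 2 + 2 = L by ring, get_run L x d ((L:Int) - 1) (by omega) (by omega), hgetL]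
      cases hy : d.head? with
      | none => simp
      | some y => simp [head?_ne d x y hd hy]
    · rw [get_run L x d j h0 (by omega), h, show (L:Int) - 1 + 1 = L by ring, hgetL]
      cases hy : d.head? with
      | none => simp
      | some y =>
        cases hz : PySem.List.pyGet? (List.replicate L x ++ d) ((L:Int) - 1 + 2) with
        | none => simp
        | some z => simp [head?_ne d x y hd hy]
  · rw [decide_eq_false hLen]
    simp

theorem triple_shift (L : Nat) (x : Int) (d : List Int) (j : Int) (h : (L : Int) ≤ j) :
    pvTriple (List.replicate L x ++ d) j = pvTriple d (j - L) := by
  unfold pvTriple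
  rw [get_shift L x d j h, get_shift L x d (j + 1) (by omega), get_shift L x d (j + 2) (by omega),
    show j + 1 - (L:Int) = j - L + 1 by ring, show j + 2 - (L:Int) = j - L + 2 by ring]
  have g1 : decide ((0:Int) ≤ j) = decide ((0:Int) ≤ j - L) := by
    rw [decide_eq_decide]; omega
  have g2 : decide (j + 2 < (((List.replicate L x ++ d).length : Nat) : Int))
      = decide (j - L + 2 < ((d.length : Nat) : Int)) := by
    rw [decide_eq_decide]
    simp
    omega
  rw [g1, g2]

theorem triple_neg (s : List Int) (j : Int) (h : j < 0) : pvTriple s j = false := by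
  unfold pvTriple
  rw [decide_eq_false (by omega : ¬ (0:Int) ≤ j)]
  simp

theorem ok_in_run (L : Nat) (x : Int) (d : List Int) (i : Nat)
    (hd : d.head? ≠ some x) (hi : i < L) :
    pvOk (List.replicate L x ++ d) (i : Int) = decide (3 ≤ L) := by
  unfold pvOk
  by_cases h3 : 3 ≤ L
  · rw [decide_eq_true h3]
    by_cases hA : (i : Int) + 3 ≤ (L : Int)
    · rw [triple_in_run L x d i (by omega) hA]
      simp
    · by_cases hB : (i : Int) = (L : Int) - 2
      · rw [show (i : Int) - 1 = (L:Int) - 3 by omega,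
          triple_in_run L x d ((L:Int) - 3) (by omega) (by omega)]
        simp
      · rw [show (i : Int) - 2 = (L:Int) - 3 by omega,
          triple_in_run L x d ((L:Int) - 3) (by omega) (by omega)]
        simp
  · rw [decide_eq_false h3]
    have t0 : pvTriple (List.replicate L x ++ d) (i : Int) = false :=
      triple_span L x d i hd (by omega) (by omega) (by omega)
    have t1 : pvTriple (List.replicate L x ++ d) ((i : Int) - 1) = false := by
      by_cases h : (i : Int) - 1 < 0
      · exact triple_neg _ _ h
      · exact triple_span L x d _ hd (by omega) (by omega) (by omega)
    have t2 : pvTriple (List.replicate L x ++ d) ((i : Int) - 2) = false := by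
      by_cases h : (i : Int) - 2 < 0
      · exact triple_neg _ _ h
      · exact triple_span L x d _ hd (by omega) (by omega) (by omega)
    rw [t0, t1, t2]
    simp

theorem ok_shift (L : Nat) (x : Int) (d : List Int) (i : Nat)
    (hd : d.head? ≠ some x) (hL : 1 ≤ L) :
    pvOk (List.replicate L x ++ d) ((L : Int) + (i : Int)) = pvOk d (i : Int) := by
  unfold pvOk
  have t0 : pvTriple (List.replicate L x ++ d) ((L:Int) + i) = pvTriple d (i : Int) := by
    rw [triple_shift L x d _ (by omega)]
    congr 1 <;> omega
  have t1 : pvTriple (List.replicate L x ++ d) ((L:Int) + i - 1) = pvTriple d ((i : Int) - 1) := by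
    by_cases h1 : 1 ≤ i
    · rw [triple_shift L x d _ (by omega)]
      congr 1 <;> omega
    · have hi0 : i = 0 := by omega
      subst hi0
      rw [show (L:Int) + ((0:Nat):Int) - 1 = (L:Int) - 1 by push_cast; ring,
        triple_span L x d _ hd (by omega) (by omega) (by omega),
        triple_neg d _ (by omega)]
  have t2 : pvTriple (List.replicate L x ++ d) ((L:Int) + i - 2) = pvTriple d ((i : Int) - 2) := by
    by_cases h2 : 2 ≤ i
    · rw [triple_shift L x d _ (by omega)]
      congr 1 <;> omega
    · by_cases h1 : i = 1
      · subst h1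
        rw [show (L:Int) + ((1:Nat):Int) - 2 = (L:Int) - 1 by push_cast; ring,
          triple_span L x d _ hd (by omega) (by omega) (by omega),
          triple_neg d _ (by omega)]
      · have hi0 : i = 0 := by omega
        subst hi0
        rw [triple_neg d _ (by omega)]
        by_cases hL2 : 2 ≤ L
        · rw [show (L:Int) + ((0:Nat):Int) - 2 = (L:Int) - 2 by push_cast; ring,
            triple_span L x d _ hd (by omega) (by omega) (by omega)]
        · rw [triple_neg _ _ (by omega)]
  rw [t0, t1, t2]

-- Peeling one maximal run off B.
theorem alt_cons (x : Int) (rest : List Int) :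
    count_removed_numbers_alt (x :: rest) =
      (if 3 ≤ (rest.takeWhile (fun y => y == x)).length + 1
        then (((rest.takeWhile (fun y => y == x)).length + 1 : Nat) : Int) else 0)
      + count_removed_numbers_alt (rest.dropWhile (fun y => y == x)) := by
  set t := rest.takeWhile (fun y => y == x) with ht
  set d := rest.dropWhile (fun y => y == x) with hdd
  set L := t.length + 1 with hLdef
  have hrep : x :: rest = List.replicate L x ++ d := by
    have h1 : t = List.replicate t.length x := by
      apply List.eq_replicate_of_mem
      intro b hb
      have := List.mem_takeWhile_imp (ht ▸ hb)
      exact eq_of_beq this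
    calc x :: rest = x :: (t ++ d) := by rw [List.takeWhile_append_dropWhile]
    _ = (x :: t) ++ d := rfl
    _ = List.replicate L x ++ d := by rw [hLdef, List.replicate_succ, ← h1]
  have hd : d.head? ≠ some x := by
    rw [hdd]
    intro hsome
    cases hcase : List.dropWhile (fun y => y == x) rest with
    | nil => rw [hcase] at hsome; simp at hsome
    | cons a as =>
      rw [hcase] at hsome
      have ha : a = x := by simpa using hsome
      have hne : List.dropWhile (fun y => y == x) rest ≠ [] := by rw [hcase]; simp
      have h2 := List.head_dropWhile_not (fun y => y == x) hne
      have h3 : (List.dropWhile (fun y => y == x) rest).head hne = a := by simp [hcase]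
      rw [h3, ha] at h2
      simp at h2
  rw [alt_eq_countP, alt_eq_countP, hrep]
  have hlen : (List.replicate L x ++ d).length = L + d.length := by simp
  rw [hlen, List.range_add, List.countP_append, List.countP_map]
  have c1 : (List.range L).countP (fun (k : Nat) => pvOk (List.replicate L x ++ d) (k : Int))
      = if 3 ≤ L then L else 0 := by
    rw [List.countP_congr (q := fun _ => decide (3 ≤ L))
      (fun k hk => by rw [ok_in_run L x d k hd (List.mem_range.mp hk)])]
    by_cases h3 : 3 ≤ L
    · simp [h3]
    · simp [h3]
  have c2 : (List.range d.length).countP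
        ((fun (k : Nat) => pvOk (List.replicate L x ++ d) (k : Int)) ∘ (fun i => L + i))
      = (List.range d.length).countP (fun (k : Nat) => pvOk d (k : Int)) := by
    apply List.countP_congr
    intro k _
    simp only [Function.comp_apply]
    rw [show ((L + k : Nat) : Int) = (L : Int) + (k : Int) by push_cast; ring]
    rw [ok_shift L x d k hd (by omega)]
  rw [c1, c2]
  have h31 : (3 ≤ L) = (3 ≤ t.length + 1) := by rw [hLdef]
  by_cases h3 : 3 ≤ L
  · rw [if_pos h3, if_pos (by omega : 3 ≤ t.length + 1)]
    push_cast
    ring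
  · rw [if_neg h3, if_neg (by omega : ¬ 3 ≤ t.length + 1)]
    push_cast
    ring

-- Invariant of A's loop with an active run of value c counted cnt times so far.
theorem loopA_some (xs : List Int) : ∀ (result : Int) (c : Int) (cnt : Int), 1 ≤ cnt →
    pvLoopA xs result (some c) cnt =
      result
      + (if 3 ≤ cnt + ((xs.takeWhile (fun y => y == c)).length : Int)
          then cnt + ((xs.takeWhile (fun y => y == c)).length : Int) else 0)
      + count_removed_numbers_alt (xs.dropWhile (fun y => y == c)) := by
  induction xs with
  | nil =>
    intro result c cnt _
    simp only [pvLoopA, List.takeWhile_nil, List.dropWhile_nil]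
    have : count_removed_numbers_alt [] = 0 := by decide
    rw [this]
    split_ifs with h1 h2 h2 <;> simp_all; omega
  | cons n rest ih =>
    intro result c cnt hcnt
    by_cases hc : c = n
    · subst hc
      simp only [pvLoopA, List.takeWhile_cons, beq_self_eq_true, if_pos,
        List.dropWhile_cons, List.length_cons]
      rw [ih result c (cnt + 1) (by omega)]
      push_cast
      split_ifs <;> omega
    · have hb : (n == c) = false := beq_eq_false_iff_ne.mpr (Ne.symm hc)
      simp only [pvLoopA, List.takeWhile_cons, List.dropWhile_cons, hb, if_neg hc]
      simp only [Bool.false_eq_true, if_false, List.length_nil]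
      rw [ih _ n 1 (by omega)]
      rw [alt_cons n rest]
      push_cast
      split_ifs <;> omega

-- ===== VERDICT (by name: the statement is the Claim_ definition above) =====
theorem count_removed_numbers_spec : Claim_equal_count_removed_numbers := by
  intro sequence _
  unfold Spec_count_removed_numbers count_removed_numbers
  cases sequence with
  | nil => decide
  | cons x rest =>
    simp only [pvLoopA]
    rw [loopA_some rest 0 x 1 (by omega), alt_cons x rest]
    push_cast
    split_ifs <;> omega
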